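-- pv_equiv track=rewrite | github.com/mahault/Alignment-experiments | webots_sim/generate_worlds.py | merge_lava_rows
-- ===== SOURCE A (Python) =====
-- def merge_lava_rows(lava_cells, width, height):
--     """Merge adjacent lava cells in each row into rectangles.
--
--     Returns list of (x_start, x_end, y) tuples where x_start..x_end
--     are inclusive grid column indices for a merged rectangle.
--     """
--     merged = []
--     for y in range(height):
--         row_lava = sorted([x for (x, yy) in lava_cells if yy == y])
--         if not row_lava:
--             continue
--         start = row_lava[0]
--         end = row_lava[0]
--         for x in row_lava[1:]:
--             if x == end + 1:
--                 end = x
--             else: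
--                 merged.append((start, end, y))
--                 start = x
--                 end = x
--         merged.append((start, end, y))
--     return merged
-- ===== SOURCE B (Python) =====
-- def merge_lava_rows(lava_cells, width, height):
--     """Merge adjacent lava cells in each row into rectangles.
--
--     One pass buckets the cells by row, then each non-empty row is sorted
--     and split at the non-consecutive gaps.
--     """
--     pairs = [(y, x) for (x, y) in lava_cells if 0 <= y < height]
--     rows = {}
--     for y, x in pairs:
--         rows.setdefault(y, []).append(x)
--     merged = []
--     for y in sorted(rows):
--         xs = sorted(rows[y])
--         gaps = [(a, b) for a, b in zip(xs, xs[1:]) if b != a + 1]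
--         starts = xs[:1] + [b for (a, b) in gaps]
--         ends = [a for (a, b) in gaps] + xs[-1:]
--         merged.extend((s, e, y) for s, e in zip(starts, ends))
--     return merged
-- ===== Notes on version B (the rewrite author's own statement) =====
-- stated objective: faster
-- what changed: Instead of scanning the whole cell list once per y in range(height), B filters and buckets the cells by row in a single pass over lava_cells, then for each sorted non-empty row key splits the sorted column list at its non-consecutive gaps via zip-pairs to build the rectangles.
import Mathlib
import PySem

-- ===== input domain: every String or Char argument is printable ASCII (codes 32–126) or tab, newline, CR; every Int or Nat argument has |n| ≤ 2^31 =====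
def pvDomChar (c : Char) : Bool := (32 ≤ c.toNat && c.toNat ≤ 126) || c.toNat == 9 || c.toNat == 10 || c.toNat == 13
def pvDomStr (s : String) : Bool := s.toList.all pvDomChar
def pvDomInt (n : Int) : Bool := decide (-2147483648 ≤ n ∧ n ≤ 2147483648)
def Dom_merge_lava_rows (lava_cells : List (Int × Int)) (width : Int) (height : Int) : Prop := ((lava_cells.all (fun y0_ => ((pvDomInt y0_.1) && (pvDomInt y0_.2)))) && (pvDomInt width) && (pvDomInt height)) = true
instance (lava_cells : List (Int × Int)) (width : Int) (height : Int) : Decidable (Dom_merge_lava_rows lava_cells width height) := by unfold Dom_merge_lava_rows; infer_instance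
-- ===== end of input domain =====

-- B buckets the cells by row in one pass and splits each sorted row at its gaps,
-- instead of A's scan of the whole cell list for every y in range(height): asymptotically faster.


-- ===== PORT A =====
def merge_lava_rows (lava_cells : List (Int × Int)) (width : Int) (height : Int) : List (Int × Int × Int) :=
  (PySem.List.pyRange 0 height 1).foldl (fun merged y =>
    let row_lava := PySem.List.sorted (lava_cells.filterMap (fun p => if p.2 = y then some p.1 else none)) (fun x => x) false
    match row_lava with
    | [] => merged
    | x0 :: rest =>
      let st := rest.foldl (fun (acc : List (Int × Int × Int) × Int × Int) x =>
          if x = acc.2.2 + 1 then (acc.1, acc.2.1, x)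
          else (acc.1 ++ [(acc.2.1, acc.2.2, y)], x, x)) (merged, x0, x0)
      st.1 ++ [(st.2.1, st.2.2, y)]) []

-- ===== PORT B =====
-- rows[y] (KeyError never reachable: every iterated key is present) is ported as getD with default [].
def merge_lava_rows_alt (lava_cells : List (Int × Int)) (width : Int) (height : Int) : List (Int × Int × Int) :=
  let pairs := lava_cells.filterMap (fun p => if 0 ≤ p.2 ∧ p.2 < height then some (p.2, p.1) else none)
  let rows := pairs.foldl (fun d p => d.modify p.1 ([] : List Int) (fun v => v ++ [p.2])) PySem.Dict.empty
  (PySem.List.sorted rows.keys (fun y => y) false).foldl (fun merged y =>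
    let xs := PySem.List.sorted (rows.getD y []) (fun x => x) false
    let gaps := (xs.zip (PySem.List.slice xs (some 1) none)).filter (fun p => decide (p.2 ≠ p.1 + 1))
    let starts := PySem.List.slice xs none (some 1) ++ gaps.map (fun p => p.2)
    let ends := gaps.map (fun p => p.1) ++ PySem.List.slice xs (some (-1)) none
    merged ++ (starts.zip ends).map (fun p => (p.1, p.2, y))) []

-- ===== PRECONDITION & SPEC =====
def Spec_merge_lava_rows (lava_cells : List (Int × Int)) (width : Int) (height : Int) (out : List (Int × Int × Int)) : Prop := out = merge_lava_rows_alt lava_cells width height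
instance (lava_cells : List (Int × Int)) (width : Int) (height : Int) (out : List (Int × Int × Int)) : Decidable (Spec_merge_lava_rows lava_cells width height out) := by unfold Spec_merge_lava_rows; infer_instance

-- ===== CLAIM (what is proved, stated in full; the proofs are below) =====
def Claim_equal_merge_lava_rows : Prop := ∀ (lava_cells : List (Int × Int)) (width : Int) (height : Int), Dom_merge_lava_rows lava_cells width height → Spec_merge_lava_rows lava_cells width height (merge_lava_rows lava_cells width height)

-- ===== LEMMAS AND PROOFS =====

-- spec helpers
def pvRuns (s e : Int) (xs : List Int) : List (Int × Int) :=
  match xs with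
  | [] => [(s, e)]
  | x :: t => if x = e + 1 then pvRuns s x t else (s, e) :: pvRuns x x t

def pvRow (y : Int) (xs : List Int) : List (Int × Int × Int) :=
  match xs with
  | [] => []
  | x0 :: rest => (pvRuns x0 x0 rest).map (fun p => (p.1, p.2, y))

def pvRowCells (lava_cells : List (Int × Int)) (y : Int) : List Int :=
  lava_cells.filterMap (fun p => if p.2 = y then some p.1 else none)

-- A's inner loop produces the runs
theorem innerA (rest : List Int) : ∀ (m : List (Int × Int × Int)) (s e y : Int),
    (let st := rest.foldl (fun (acc : List (Int × Int × Int) × Int × Int) x =>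
          if x = acc.2.2 + 1 then (acc.1, acc.2.1, x)
          else (acc.1 ++ [(acc.2.1, acc.2.2, y)], x, x)) (m, s, e)
     st.1 ++ [(st.2.1, st.2.2, y)]) = m ++ (pvRuns s e rest).map (fun p => (p.1, p.2, y)) := by
  induction rest with
  | nil => intro m s e y; simp [pvRuns]
  | cons x t ih =>
    intro m s e y
    simp only [List.foldl_cons, pvRuns]
    by_cases h : x = e + 1
    · subst h
      simpa using ih m s (e + 1) y
    · simp only [if_neg h]
      simpa using ih (m ++ [(s, e, y)]) x x y

theorem A_eq_flatMap (lava_cells : List (Int × Int)) (width height : Int) :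
    merge_lava_rows lava_cells width height =
      (PySem.List.pyRange 0 height 1).flatMap
        (fun y => pvRow y (PySem.List.sorted (pvRowCells lava_cells y) (fun x => x) false)) := by
  unfold merge_lava_rows
  rw [show (fun (merged : List (Int × Int × Int)) (y : Int) =>
    match PySem.List.sorted (lava_cells.filterMap (fun p => if p.2 = y then some p.1 else none)) (fun x => x) false with
    | [] => merged
    | x0 :: rest =>
      let st := rest.foldl (fun (acc : List (Int × Int × Int) × Int × Int) x =>
          if x = acc.2.2 + 1 then (acc.1, acc.2.1, x)
          else (acc.1 ++ [(acc.2.1, acc.2.2, y)], x, x)) (merged, x0, x0)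
      st.1 ++ [(st.2.1, st.2.2, y)]) =
    (fun merged y => merged ++ pvRow y (PySem.List.sorted (pvRowCells lava_cells y) (fun x => x) false)) from ?_]
  · exact PySem.List.foldl_append_eq_flatMap _ _ _
  · funext merged y
    rcases h : PySem.List.sorted (pvRowCells lava_cells y) (fun x => x) false with _ | ⟨x0, rest⟩
    · simp only [pvRowCells] at h; rw [h]; simp [pvRow]
    · simp only [pvRowCells] at h; rw [h]; simpa [pvRow] using innerA rest merged x0 x0 y

-- B's gap-splitting produces the runs
theorem gapsZip (t : List Int) : ∀ (s c : Int),
    ((s :: (((c :: t).zip t).filter (fun p => decide (p.2 ≠ p.1 + 1))).map (fun p => p.2)).zip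
      ((((c :: t).zip t).filter (fun p => decide (p.2 ≠ p.1 + 1))).map (fun p => p.1) ++ (c :: t).drop t.length))
    = pvRuns s c t := by
  induction t with
  | nil => intro s c; simp [pvRuns]
  | cons x t' ih =>
    intro s c
    simp only [List.zip_cons_cons, List.filter_cons, pvRuns]
    by_cases h : x = c + 1
    · simp only [h, decide_not, decide_eq_true_eq]
      rw [if_neg (by simp)]
      simpa using ih s (c + 1)
    · rw [if_pos (by simpa using h), if_neg h]
      simpa using ih x x

theorem innerB (y : Int) (xs : List Int) :
    ((PySem.List.slice xs none (some 1) ++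
        ((xs.zip (PySem.List.slice xs (some 1) none)).filter (fun p => decide (p.2 ≠ p.1 + 1))).map (fun p => p.2)).zip
      (((xs.zip (PySem.List.slice xs (some 1) none)).filter (fun p => decide (p.2 ≠ p.1 + 1))).map (fun p => p.1) ++
        PySem.List.slice xs (some (-1)) none)).map (fun p => (p.1, p.2, y))
    = pvRow y xs := by
  rcases xs with _ | ⟨c, t⟩
  · simp [pvRow, PySem.List.slice]
  · rw [PySem.List.slice_from_one, PySem.List.slice_from_neg_one,
        show PySem.List.slice (c :: t) none (some 1) = [c] by
          rw [PySem.List.slice_to _ (by norm_num)]; rfl]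
    simp only [List.tail_cons, List.length_cons, Nat.add_sub_cancel, List.cons_append, List.nil_append]
    rw [gapsZip t c c]
    rfl

def pvPairs (lava_cells : List (Int × Int)) (height : Int) : List (Int × Int) :=
  lava_cells.filterMap (fun p => if 0 ≤ p.2 ∧ p.2 < height then some (p.2, p.1) else none)

def pvRows (lava_cells : List (Int × Int)) (height : Int) : PySem.Dict Int (List Int) :=
  (pvPairs lava_cells height).foldl (fun d p => d.modify p.1 ([] : List Int) (fun v => v ++ [p.2])) PySem.Dict.empty

theorem getD_pvRows (lava_cells : List (Int × Int)) (height y : Int) (h0 : 0 ≤ y) (h1 : y < height) :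
    (pvRows lava_cells height).getD y [] = pvRowCells lava_cells y := by
  unfold pvRows
  rw [PySem.Dict.getD_foldl_modify_append]
  simp only [PySem.Dict.getD_empty, List.nil_append]
  induction lava_cells with
  | nil => rfl
  | cons p t ih =>
    simp only [pvPairs, pvRowCells, List.filterMap_cons] at *
    by_cases hy : p.2 = y
    · rw [if_pos (by omega), if_pos hy]
      simpa [hy, List.filter_cons] using ih
    · by_cases hr : 0 ≤ p.2 ∧ p.2 < height
      · rw [if_pos hr, if_neg hy]
        simpa [List.filter_cons, hy] using ih
      · rw [if_neg hr, if_neg hy]; exact ih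

theorem keys_pvRows (lava_cells : List (Int × Int)) (height : Int) :
    (pvRows lava_cells height).keys = PySem.Set.ofList ((pvPairs lava_cells height).map (fun p => p.1)) := by
  unfold pvRows
  rw [PySem.Dict.keys_foldl_modify_key]
  simp [PySem.Set.update_nil_left]

theorem mem_pairs_fst (lava_cells : List (Int × Int)) (height y : Int) :
    y ∈ (pvPairs lava_cells height).map (fun p => p.1) ↔
      ((0 ≤ y ∧ y < height) ∧ pvRowCells lava_cells y ≠ []) := by
  simp only [pvPairs, pvRowCells, List.mem_map, List.mem_filterMap, ne_eq,
    List.filterMap_eq_nil_iff, not_forall]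
  constructor
  · rintro ⟨q, ⟨p, hp, hif⟩, rfl⟩
    split_ifs at hif with hr
    obtain rfl := Option.some.inj hif
    exact ⟨hr, p, hp, by simp⟩
  · rintro ⟨hr, p, hp, hne⟩
    have hpy : p.2 = y := by by_contra hc; exact hne (by simp [hc])
    exact ⟨(y, p.1), ⟨p, hp, by rw [if_pos (hpy ▸ hr), hpy]⟩, rfl⟩

theorem sortedKeys_pvRows (lava_cells : List (Int × Int)) (height : Int) :
    PySem.List.sorted (pvRows lava_cells height).keys (fun y => y) false =
      (PySem.List.pyRange 0 height 1).filter (fun y => !(pvRowCells lava_cells y).isEmpty) := by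
  apply PySem.List.sorted_id_eq_of_perm_of_pairwise
  · rw [(List.perm_ext_iff_of_nodup
      ((PySem.List.nodup_pyRange_one 0 height).filter _)
      (by rw [keys_pvRows]; exact PySem.Set.nodup_ofList _))]
    intro a
    rw [keys_pvRows, PySem.Set.mem_ofList, mem_pairs_fst]
    simp [List.mem_filter, PySem.List.mem_pyRange_one, List.isEmpty_iff, and_comm]
  · exact List.Pairwise.imp le_of_lt ((PySem.List.pairwise_lt_pyRange_one 0 height).filter _)
theorem flatMap_filter_of_nil {α β : Type} (l : List α) (p : α → Bool) (f : α → List β)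
    (h : ∀ x ∈ l, p x = false → f x = []) : l.flatMap f = (l.filter p).flatMap f := by
  induction l with
  | nil => rfl
  | cons x t ih =>
    simp only [List.flatMap_cons, List.filter_cons]
    by_cases hp : p x = true
    · rw [if_pos hp, List.flatMap_cons, ih (fun a ha => h a (List.mem_cons_of_mem _ ha))]
    · rw [h x (List.mem_cons_self) (by simpa using hp), if_neg hp,
        ih (fun a ha => h a (List.mem_cons_of_mem _ ha))]
      rfl

theorem B_eq_flatMap (lava_cells : List (Int × Int)) (width height : Int) :
    merge_lava_rows_alt lava_cells width height =
      (PySem.List.sorted (pvRows lava_cells height).keys (fun y => y) false).flatMap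
        (fun y => pvRow y (PySem.List.sorted ((pvRows lava_cells height).getD y []) (fun x => x) false)) := by
  unfold merge_lava_rows_alt
  simp only []
  rw [show (fun (merged : List (Int × Int × Int)) (y : Int) =>
      let xs := PySem.List.sorted (((lava_cells.filterMap (fun p => if 0 ≤ p.2 ∧ p.2 < height then some (p.2, p.1) else none)).foldl (fun d p => d.modify p.1 ([] : List Int) (fun v => v ++ [p.2])) PySem.Dict.empty).getD y []) (fun x => x) false
      let gaps := (xs.zip (PySem.List.slice xs (some 1) none)).filter (fun p => decide (p.2 ≠ p.1 + 1))
      let starts := PySem.List.slice xs none (some 1) ++ gaps.map (fun p => p.2)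
      let ends := gaps.map (fun p => p.1) ++ PySem.List.slice xs (some (-1)) none
      merged ++ (starts.zip ends).map (fun p => (p.1, p.2, y))) =
    (fun merged y => merged ++ pvRow y (PySem.List.sorted ((pvRows lava_cells height).getD y []) (fun x => x) false)) from ?_]
  · rw [PySem.List.foldl_append_eq_flatMap]
    rfl
  · funext merged y
    simp only []
    rw [innerB]
    rfl

theorem flatMap_congr_mem {α β : Type} (l : List α) (f g : α → List β)
    (h : ∀ x ∈ l, f x = g x) : l.flatMap f = l.flatMap g := by
  induction l with
  | nil => rfl
  | cons x t ih =>
    simp only [List.flatMap_cons, h x List.mem_cons_self,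
      ih (fun a ha => h a (List.mem_cons_of_mem _ ha))]

theorem final (lava_cells : List (Int × Int)) (width height : Int) :
    merge_lava_rows lava_cells width height = merge_lava_rows_alt lava_cells width height := by
  rw [A_eq_flatMap, B_eq_flatMap, sortedKeys_pvRows]
  rw [flatMap_filter_of_nil _ (fun y => !(pvRowCells lava_cells y).isEmpty) _ ?_]
  · apply flatMap_congr_mem
    intro y hy
    rw [List.mem_filter, PySem.List.mem_pyRange_one] at hy
    rw [getD_pvRows lava_cells height y hy.1.1 hy.1.2]
  · intro y _ hy
    have h0 : pvRowCells lava_cells y = [] := by simpa [List.isEmpty_iff] using hy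
    rw [h0]
    rfl


-- ===== VERDICT (by name: the statement is the Claim_ definition above) =====
theorem merge_lava_rows_spec : Claim_equal_merge_lava_rows := by
  intro lava_cells width height _
  unfold Spec_merge_lava_rows
  exact final lava_cells width height
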